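-- pv_equiv track=rewrite | github.com/aqnaakhila/SistemPakar | isp_backward_reasoning.py | backward_reason
-- ===== SOURCE A (Python) =====
-- rules = [
--     {
--         "if": {
--             "Layanan Teknis": "Upgrade kualitas",
--             "Strategi Bisnis": "Tidak perlu perbaikan",
--             "Kepatuhan Regulasi": "Memenuhi aturan",
--             "Kepuasan Pelanggan": "Pelanggan puas"
--         },
--         "then": "ISP Berkualitas Baik"
--     },
--     {
--         "if": {
--             "Layanan Teknis": "Upgrade kualitas",
--             "Strategi Bisnis": "Tidak perlu perbaikan",
--             "Kepatuhan Regulasi": "Memenuhi aturan",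
--             "Kepuasan Pelanggan": "Pelanggan tidak puas"
--         },
--         "then": "ISP Bermasalah"
--     },
--     {
--         "if": {
--             "Layanan Teknis": "Upgrade kualitas",
--             "Strategi Bisnis": "Perlu perbaikan",
--             "Kepuasan Pelanggan": "Pelanggan puas"
--         },
--         "then": "ISP Perlu Peningkatan"
--     },
--     {
--         "if": {
--             "Layanan Teknis": "Tidak perlu upgrade kualitas",
--             "Strategi Bisnis": "Tidak perlu perbaikan",
--             "Kepuasan Pelanggan": "Pelanggan puas"
--         },
--         "then": "ISP Berkualitas Baik"
--     },
--     {
--         "if": {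
--             "Layanan Teknis": "Tidak perlu upgrade kualitas",
--             "Strategi Bisnis": "Perlu perbaikan",
--             "Kepatuhan Regulasi": "Tidak memenuhi aturan",
--             "Kepuasan Pelanggan": "Pelanggan tidak puas"
--         },
--         "then": "ISP Bermasalah"
--     },
--     # Tambahkan aturan lainnya sesuai file rules.txt bila perlu
-- ]
--
-- def backward_reason(goal, facts):
--     for rule in rules:
--         if rule["then"] == goal:
--             required = rule["if"]
--             needed = []
--             for k, v in required.items():
--                 if k not in facts:
--                     needed.append((k, v))
--                 elif facts[k] != v:
--                     break
--             else:
--                 if not needed: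
--                     return True, []
--                 else:
--                     return None, needed
--     return False, []
-- ===== SOURCE B (Python) =====
-- rules = [
--     {
--         "if": {
--             "Layanan Teknis": "Upgrade kualitas",
--             "Strategi Bisnis": "Tidak perlu perbaikan",
--             "Kepatuhan Regulasi": "Memenuhi aturan",
--             "Kepuasan Pelanggan": "Pelanggan puas"
--         },
--         "then": "ISP Berkualitas Baik"
--     },
--     {
--         "if": {
--             "Layanan Teknis": "Upgrade kualitas",
--             "Strategi Bisnis": "Tidak perlu perbaikan",
--             "Kepatuhan Regulasi": "Memenuhi aturan",
--             "Kepuasan Pelanggan": "Pelanggan tidak puas"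
--         },
--         "then": "ISP Bermasalah"
--     },
--     {
--         "if": {
--             "Layanan Teknis": "Upgrade kualitas",
--             "Strategi Bisnis": "Perlu perbaikan",
--             "Kepuasan Pelanggan": "Pelanggan puas"
--         },
--         "then": "ISP Perlu Peningkatan"
--     },
--     {
--         "if": {
--             "Layanan Teknis": "Tidak perlu upgrade kualitas",
--             "Strategi Bisnis": "Tidak perlu perbaikan",
--             "Kepuasan Pelanggan": "Pelanggan puas"
--         },
--         "then": "ISP Berkualitas Baik"
--     },
--     {
--         "if": {
--             "Layanan Teknis": "Tidak perlu upgrade kualitas",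
--             "Strategi Bisnis": "Perlu perbaikan",
--             "Kepatuhan Regulasi": "Tidak memenuhi aturan",
--             "Kepuasan Pelanggan": "Pelanggan tidak puas"
--         },
--         "then": "ISP Bermasalah"
--     },
-- ]
--
-- # Goal index built once at module load: goal -> list of condition dicts, in rule order.
-- _rules_by_goal = {}
-- for _r in rules:
--     _rules_by_goal.setdefault(_r["then"], []).append(_r["if"])
--
--
-- def _classify(facts, k, v):
--     """Per-condition status: 'ok' (fact matches), 'missing' (unknown), 'conflict' (fact contradicts)."""
--     if k not in facts:
--         return "missing"
--     return "ok" if facts[k] == v else "conflict"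
--
--
-- def backward_reason(goal, facts):
--     def try_rules(conds):
--         if not conds:
--             return False, []
--         tagged = [(_classify(facts, k, v), k, v) for k, v in conds[0].items()]
--         if any(s == "conflict" for s, _, _ in tagged):
--             return try_rules(conds[1:])
--         needed = [(k, v) for s, k, v in tagged if s == "missing"]
--         return (True, []) if not needed else (None, needed)
--     return try_rules(_rules_by_goal.get(goal, []))
-- ===== Notes on version B (the rewrite author's own statement) =====
-- stated objective: alternative
-- what changed: Replaces A's linear scan over all rules with a goal->conditions hash index built once at module load (the then==goal test disappears), and replaces A's fused break/for-else condition loop by a recursive candidate walk over a per-condition tagged classification ('ok'/'missing'/'conflict') from which the verdict and the needed list are derived.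
import Mathlib
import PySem

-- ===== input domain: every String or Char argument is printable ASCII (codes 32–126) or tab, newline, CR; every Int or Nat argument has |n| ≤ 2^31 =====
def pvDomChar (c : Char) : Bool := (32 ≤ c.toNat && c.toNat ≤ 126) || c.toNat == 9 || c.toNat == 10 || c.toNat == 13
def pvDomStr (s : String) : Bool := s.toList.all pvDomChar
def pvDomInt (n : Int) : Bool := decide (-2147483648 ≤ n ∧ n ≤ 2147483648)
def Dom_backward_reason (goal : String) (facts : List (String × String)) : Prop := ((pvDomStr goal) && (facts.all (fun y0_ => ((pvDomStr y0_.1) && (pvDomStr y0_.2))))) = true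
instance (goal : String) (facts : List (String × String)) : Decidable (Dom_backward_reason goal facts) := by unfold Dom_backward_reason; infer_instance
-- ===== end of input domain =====

-- B replaces A's linear scan over all rules by a goal->conditions index built once,
-- recursing over the candidate rules and classifying each condition into a tagged status list.

-- shared module-level data: the rule base (each rule as (if-conditions in dict order, then))
def pvRules : List (List (String × String) × String) :=
  [ ([("Layanan Teknis", "Upgrade kualitas"),
      ("Strategi Bisnis", "Tidak perlu perbaikan"),
      ("Kepatuhan Regulasi", "Memenuhi aturan"),
      ("Kepuasan Pelanggan", "Pelanggan puas")], "ISP Berkualitas Baik"),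
    ([("Layanan Teknis", "Upgrade kualitas"),
      ("Strategi Bisnis", "Tidak perlu perbaikan"),
      ("Kepatuhan Regulasi", "Memenuhi aturan"),
      ("Kepuasan Pelanggan", "Pelanggan tidak puas")], "ISP Bermasalah"),
    ([("Layanan Teknis", "Upgrade kualitas"),
      ("Strategi Bisnis", "Perlu perbaikan"),
      ("Kepuasan Pelanggan", "Pelanggan puas")], "ISP Perlu Peningkatan"),
    ([("Layanan Teknis", "Tidak perlu upgrade kualitas"),
      ("Strategi Bisnis", "Tidak perlu perbaikan"),
      ("Kepuasan Pelanggan", "Pelanggan puas")], "ISP Berkualitas Baik"),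
    ([("Layanan Teknis", "Tidak perlu upgrade kualitas"),
      ("Strategi Bisnis", "Perlu perbaikan"),
      ("Kepatuhan Regulasi", "Tidak memenuhi aturan"),
      ("Kepuasan Pelanggan", "Pelanggan tidak puas")], "ISP Bermasalah") ]

-- 'k in facts' / 'facts[k]' on the dict-as-association-list (first match)
def pvFactGet? (facts : List (String × String)) (k : String) : Option String :=
  (facts.find? (fun p => p.1 == k)).map (·.2)

-- ===== PORT A =====
-- A's inner for-loop over a rule's conditions: accumulator 'needed'; 'none' = break (contradiction),
-- 'some r' = the for/else return value.
def bwInnerA (facts : List (String × String)) :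
    List (String × String) → List (String × String) → Option (Option Bool × List (String × String))
  | [], needed => if needed.isEmpty then some (some true, []) else some (none, needed)
  | (k, v) :: rest, needed =>
    match pvFactGet? facts k with
    | none => bwInnerA facts rest (needed ++ [(k, v)])
    | some w => if w ≠ v then none else bwInnerA facts rest needed

def bwLoopA (goal : String) (facts : List (String × String)) :
    List (List (String × String) × String) → Option Bool × List (String × String)
  | [] => (some false, [])
  | (cond, thn) :: rs =>
    if thn == goal then
      match bwInnerA facts cond [] with
      | some res => res
      | none => bwLoopA goal facts rs
    else bwLoopA goal facts rs

def backward_reason (goal : String) (facts : List (String × String)) : Option Bool × (List (String × String)) :=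
  bwLoopA goal facts pvRules

-- ===== PORT B =====
-- module-level: _rules_by_goal = {}; for _r in rules: _rules_by_goal.setdefault(_r["then"], []).append(_r["if"])
def pvRulesByGoal : PySem.Dict String (List (List (String × String))) :=
  pvRules.foldl (fun d r => d.insert r.2 (d.getD r.2 [] ++ [r.1])) PySem.Dict.empty

-- _classify(facts, k, v)
def bwClassify (facts : List (String × String)) (k v : String) : String :=
  match pvFactGet? facts k with
  | none => "missing"
  | some w => if w == v then "ok" else "conflict"

-- the inner recursive try_rules(conds)
def bwTryRules (facts : List (String × String)) :
    List (List (String × String)) → Option Bool × List (String × String)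
  | [] => (some false, [])
  | cond :: rest =>
    let tagged := cond.map (fun p => (bwClassify facts p.1 p.2, p.1, p.2))
    if tagged.any (fun t => t.1 == "conflict") then bwTryRules facts rest
    else
      let needed := (tagged.filter (fun t => t.1 == "missing")).map (fun t => (t.2.1, t.2.2))
      if needed.isEmpty then (some true, []) else (none, needed)

def backward_reason_alt (goal : String) (facts : List (String × String)) : Option Bool × (List (String × String)) :=
  bwTryRules facts (pvRulesByGoal.getD goal [])

-- ===== PRECONDITION & SPEC =====
def Spec_backward_reason (goal : String) (facts : List (String × String)) (out : Option Bool × (List (String × String))) : Prop := out = backward_reason_alt goal facts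
instance (goal : String) (facts : List (String × String)) (out : Option Bool × (List (String × String))) : Decidable (Spec_backward_reason goal facts out) := by unfold Spec_backward_reason; infer_instance

-- ===== CLAIM (what is proved, stated in full; the proofs are below) =====
def Claim_equal_backward_reason : Prop := ∀ (goal : String) (facts : List (String × String)), Dom_backward_reason goal facts → Spec_backward_reason goal facts (backward_reason goal facts)

-- ===== LEMMAS AND PROOFS =====

-- the five rule condition lists, for the proofs below
def pvCond1 : List (String × String) :=
  [("Layanan Teknis", "Upgrade kualitas"), ("Strategi Bisnis", "Tidak perlu perbaikan"),
   ("Kepatuhan Regulasi", "Memenuhi aturan"), ("Kepuasan Pelanggan", "Pelanggan puas")]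
def pvCond2 : List (String × String) :=
  [("Layanan Teknis", "Upgrade kualitas"), ("Strategi Bisnis", "Tidak perlu perbaikan"),
   ("Kepatuhan Regulasi", "Memenuhi aturan"), ("Kepuasan Pelanggan", "Pelanggan tidak puas")]
def pvCond3 : List (String × String) :=
  [("Layanan Teknis", "Upgrade kualitas"), ("Strategi Bisnis", "Perlu perbaikan"),
   ("Kepuasan Pelanggan", "Pelanggan puas")]
def pvCond4 : List (String × String) :=
  [("Layanan Teknis", "Tidak perlu upgrade kualitas"), ("Strategi Bisnis", "Tidak perlu perbaikan"),
   ("Kepuasan Pelanggan", "Pelanggan puas")]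
def pvCond5 : List (String × String) :=
  [("Layanan Teknis", "Tidak perlu upgrade kualitas"), ("Strategi Bisnis", "Perlu perbaikan"),
   ("Kepatuhan Regulasi", "Tidak memenuhi aturan"), ("Kepuasan Pelanggan", "Pelanggan tidak puas")]

-- the goal index retrieves exactly the conditions of the rules whose 'then' is the goal, in order
theorem getD_rulesByGoal (goal : String) :
    pvRulesByGoal.getD goal [] = ((pvRules.filter (fun r => r.2 == goal)).map (·.1)) := by
  by_cases h1 : goal = "ISP Berkualitas Baik"
  · subst h1; decide
  by_cases h2 : goal = "ISP Bermasalah"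
  · subst h2; decide
  by_cases h3 : goal = "ISP Perlu Peningkatan"
  · subst h3; decide
  · have hD : pvRulesByGoal =
        ((PySem.Dict.empty.insert "ISP Berkualitas Baik" [pvCond1, pvCond4]).insert
            "ISP Bermasalah" [pvCond2, pvCond5]).insert "ISP Perlu Peningkatan" [pvCond3] := by
      decide
    rw [hD, PySem.Dict.getD_insert, PySem.Dict.getD_insert, PySem.Dict.getD_insert]
    simp only [h1, h2, h3, if_false, PySem.Dict.getD_empty]
    have e1 : (("ISP Berkualitas Baik" : String) == goal) = false := by
      simp [BEq.beq]; exact fun h => h1 h.symm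
    have e2 : (("ISP Bermasalah" : String) == goal) = false := by
      simp [BEq.beq]; exact fun h => h2 h.symm
    have e3 : (("ISP Perlu Peningkatan" : String) == goal) = false := by
      simp [BEq.beq]; exact fun h => h3 h.symm
    simp [pvRules, List.filter, e1, e2, e3]

-- A's fused inner loop, expressed through B's tagged classification (generalizing the accumulator)
theorem bwInnerA_eq (facts : List (String × String)) (cond needed : List (String × String)) :
    bwInnerA facts cond needed =
      (let tagged := cond.map (fun p => (bwClassify facts p.1 p.2, p.1, p.2))
       if tagged.any (fun t => t.1 == "conflict") then none
       else
         let n := needed ++ (tagged.filter (fun t => t.1 == "missing")).map (fun t => (t.2.1, t.2.2))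
         if n.isEmpty then some (some true, []) else some (none, n)) := by
  induction cond generalizing needed with
  | nil => simp [bwInnerA]
  | cons p rest ih =>
    obtain ⟨k, v⟩ := p
    cases h : pvFactGet? facts k with
    | none =>
      have hc : bwClassify facts k v = "missing" := by simp [bwClassify, h]
      simp only [bwInnerA, h, ih, List.map_cons, List.any_cons, List.filter_cons, hc]
      cases _hA : ((List.map (fun p => (bwClassify facts p.1 p.2, p.1, p.2)) rest).any
          (fun t => t.1 == "conflict")) <;> simp [List.append_assoc]
    | some w =>
      by_cases hw : w = v
      · have hc : bwClassify facts k v = "ok" := by simp [bwClassify, h, hw]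
        simp only [bwInnerA, h, hw, ne_eq, not_true_eq_false, if_false, ih,
          List.map_cons, List.any_cons, List.filter_cons, hc]
        cases _hA : ((List.map (fun p => (bwClassify facts p.1 p.2, p.1, p.2)) rest).any
            (fun t => t.1 == "conflict")) <;> simp
      · have hc : bwClassify facts k v = "conflict" := by simp [bwClassify, h, hw]
        have hw' : (w ≠ v) = True := by simp [hw]
        simp [bwInnerA, h, hw, hc]

-- A's outer rule scan = B's recursion over the goal-filtered candidates
theorem bwLoop_eq (goal : String) (facts : List (String × String))
    (rs : List (List (String × String) × String)) :
    bwLoopA goal facts rs = bwTryRules facts ((rs.filter (fun r => r.2 == goal)).map (·.1)) := by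
  induction rs with
  | nil => rfl
  | cons r rs ih =>
    obtain ⟨cond, thn⟩ := r
    by_cases hg : thn == goal
    · simp only [bwLoopA, hg, if_true, List.filter_cons, List.map_cons, bwInnerA_eq]
      rw [bwTryRules]
      by_cases hc : (cond.map (fun p => (bwClassify facts p.1 p.2, p.1, p.2))).any
          (fun t => t.1 == "conflict")
      · simp [hc, ih]
      · simp only [hc]
        rw [if_neg (by simp)]
        cases hne : (((cond.map (fun p => (bwClassify facts p.1 p.2, p.1, p.2))).filter
            (fun t => t.1 == "missing")).map (fun t => (t.2.1, t.2.2))).isEmpty <;>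
          simp [hne, List.nil_append]
    · simp only [bwLoopA, hg, List.filter_cons]
      simp [ih]

-- ===== VERDICT (by name: the statement is the Claim_ definition above) =====
theorem backward_reason_spec : Claim_equal_backward_reason := by
  intro goal facts _
  unfold Spec_backward_reason backward_reason backward_reason_alt
  rw [getD_rulesByGoal]
  exact bwLoop_eq goal facts pvRules
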